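-- pv_equiv track=rewrite | github.com/gahjelle/everybody_codes | python/src/2025_the-song-of-ducks-and-dragons/10_feast-on-the-board/ec202510.py | parse_board
-- ===== SOURCE A (Python) =====
-- from typing import TypeAlias
--
-- Square: TypeAlias = tuple[int, int]
--
-- def parse_board(
--     puzzle_input: str,
-- ) -> tuple[set[Square], Square, set[Square], set[Square]]:
--     """Parse the game board. Find the dragon, all sheep, and all hideouts"""
--     board = {
--         (row, col): char
--         for row, line in enumerate(puzzle_input.splitlines())
--         for col, char in enumerate(line)
--     }
--     dragon = next(pos for pos, char in board.items() if char == "D")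
--     sheep = {pos for pos, char in board.items() if char == "S"}
--     hideouts = {pos for pos, char in board.items() if char == "#"}
--     return set(board), dragon, sheep, hideouts
-- ===== SOURCE B (Python) =====
-- def parse_board(puzzle_input):
--     """Parse the game board via an inverted index: group cell positions by
--     character, then read the dragon, sheep and hideouts off that index."""
--     positions = set()
--     by_char = {}
--     for row, line in enumerate(puzzle_input.splitlines()):
--         for col, char in enumerate(line):
--             positions.add((row, col))
--             by_char.setdefault(char, []).append((row, col))
--     return (
--         positions,
--         by_char["D"][0],
--         set(by_char.get("S", [])),
--         set(by_char.get("#", [])),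
--     )
-- ===== Notes on version B (the rewrite author's own statement) =====
-- stated objective: alternative
-- what changed: B builds an inverted index mapping each character to the list of its positions in one pass with setdefault and reads dragon/sheep/hideouts off it by dict lookups, instead of A's position->character board dict scanned four more times with per-character tests; Pre_ excludes boards with no dragon cell, where A raises StopIteration and B raises KeyError.
import Mathlib
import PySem

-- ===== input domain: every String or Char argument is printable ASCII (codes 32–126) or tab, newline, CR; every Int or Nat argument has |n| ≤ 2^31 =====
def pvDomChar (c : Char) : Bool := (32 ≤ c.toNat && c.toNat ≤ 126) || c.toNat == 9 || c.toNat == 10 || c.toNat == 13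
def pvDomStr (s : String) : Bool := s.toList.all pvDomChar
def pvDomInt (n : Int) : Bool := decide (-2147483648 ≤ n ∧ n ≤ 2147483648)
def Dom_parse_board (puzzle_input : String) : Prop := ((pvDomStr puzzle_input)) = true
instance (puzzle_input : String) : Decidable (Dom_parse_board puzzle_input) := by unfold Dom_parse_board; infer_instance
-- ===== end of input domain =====

-- B groups cell positions by character into an inverted index and reads the results off it, instead of A's board dict scanned four more times; equal return values wherever A returns.

-- ===== PORT A =====
def parse_board (puzzle_input : String) : (List (Int × Int)) × (Int × Int) × (List (Int × Int)) × (List (Int × Int)) :=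
  let board : PySem.Dict (Int × Int) Char :=
    (PySem.List.enumerate (PySem.Str.splitlines puzzle_input)).foldl
      (fun d rl => (PySem.List.enumerate rl.2.toList).foldl
        (fun d cc => d.insert (rl.1, cc.1) cc.2) d)
      PySem.Dict.empty
  -- next(...) raises StopIteration when no 'D' exists; Pre_ excludes that, the port returns (0,0) there
  let dragon : Int × Int := ((board.items.find? (fun p => p.2 == 'D')).map (·.1)).getD (0, 0)
  let sheep := PySem.Set.ofList ((board.items.filter (fun p => p.2 == 'S')).map (·.1))
  let hideouts := PySem.Set.ofList ((board.items.filter (fun p => p.2 == '#')).map (·.1))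
  (PySem.Set.ofList board.keys, dragon, sheep, hideouts)

-- ===== PORT B =====
-- loop body of B: add pos to the positions set and append it to by_char[char] (setdefault+append = modify with [] default)
def pvStepB (st : PySem.Set (Int × Int) × PySem.Dict Char (List (Int × Int)))
    (pc : (Int × Int) × Char) :
    PySem.Set (Int × Int) × PySem.Dict Char (List (Int × Int)) :=
  (PySem.Set.add st.1 pc.1, st.2.modify pc.2 [] (· ++ [pc.1]))

def parse_board_alt (puzzle_input : String) : (List (Int × Int)) × (Int × Int) × (List (Int × Int)) × (List (Int × Int)) :=
  let st :=
    (PySem.List.enumerate (PySem.Str.splitlines puzzle_input)).foldl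
      (fun st rl => (PySem.List.enumerate rl.2.toList).foldl
        (fun st cc => pvStepB st ((rl.1, cc.1), cc.2)) st)
      ((PySem.Set.empty : PySem.Set (Int × Int)), (PySem.Dict.empty : PySem.Dict Char (List (Int × Int))))
  -- by_char["D"][0] raises KeyError when no 'D' exists; Pre_ excludes that, the port returns (0,0) there
  (st.1,
   (PySem.List.pyGet? (st.2.getD 'D' []) 0).getD (0, 0),
   PySem.Set.ofList (st.2.getD 'S' []),
   PySem.Set.ofList (st.2.getD '#' []))

-- ===== PRECONDITION & SPEC =====
-- Pre_ excludes boards with no 'D' cell: there A's next() raises StopIteration and B's by_char["D"] raises KeyError.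
def Pre_parse_board (puzzle_input : String) : Prop :=
  'D' ∈ (PySem.Str.splitlines puzzle_input).flatMap String.toList
instance (puzzle_input : String) : Decidable (Pre_parse_board puzzle_input) := by unfold Pre_parse_board; infer_instance
def pvWitness_parse_board : String := "S#\nD"

def Spec_parse_board (puzzle_input : String) (out : (List (Int × Int)) × (Int × Int) × (List (Int × Int)) × (List (Int × Int))) : Prop := out = parse_board_alt puzzle_input
instance (puzzle_input : String) (out : (List (Int × Int)) × (Int × Int) × (List (Int × Int)) × (List (Int × Int))) : Decidable (Spec_parse_board puzzle_input out) := by unfold Spec_parse_board; infer_instance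

-- ===== CLAIM (what is proved, stated in full; the proofs are below) =====
def Claim_equal_parse_board : Prop := ∀ (puzzle_input : String), Dom_parse_board puzzle_input → Pre_parse_board puzzle_input → Spec_parse_board puzzle_input (parse_board puzzle_input)

-- ===== LEMMAS AND PROOFS =====

-- the row-major cell list both nested loops traverse
def pvLineCells (rl : Int × String) : List ((Int × Int) × Char) :=
  (PySem.List.enumerate rl.2.toList).map (fun cc => ((rl.1, cc.1), cc.2))

def pvCells (puzzle_input : String) : List ((Int × Int) × Char) :=
  (PySem.List.enumerate (PySem.Str.splitlines puzzle_input)).flatMap pvLineCells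

-- flattening A's nested dict-building fold
theorem pvFlattenA (LL : List (Int × String)) (d : PySem.Dict (Int × Int) Char) :
    LL.foldl (fun d rl => (PySem.List.enumerate rl.2.toList).foldl
        (fun d cc => d.insert (rl.1, cc.1) cc.2) d) d
      = (LL.flatMap pvLineCells).foldl (fun d pc => d.insert pc.1 pc.2) d := by
  induction LL generalizing d with
  | nil => rfl
  | cons rl rest ih =>
      simp only [List.foldl_cons, List.flatMap_cons, List.foldl_append, ih, pvLineCells,
        List.foldl_map]

-- flattening B's nested fold
theorem pvFlattenB (LL : List (Int × String)) (st : PySem.Set (Int × Int) × PySem.Dict Char (List (Int × Int))) :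
    LL.foldl (fun st rl => (PySem.List.enumerate rl.2.toList).foldl
        (fun st cc => pvStepB st ((rl.1, cc.1), cc.2)) st) st
      = (LL.flatMap pvLineCells).foldl pvStepB st := by
  induction LL generalizing st with
  | nil => rfl
  | cons rl rest ih =>
      simp only [List.foldl_cons, List.flatMap_cons, List.foldl_append, ih, pvLineCells,
        List.foldl_map]

-- cell keys are pairwise distinct (rows strictly increase across lines, cols within a line)
theorem pvNodupKeys (lines : List String) (s0 : Int) :
    (((PySem.List.enumerate lines s0).flatMap pvLineCells).map (·.1)).Nodup := by
  induction lines generalizing s0 with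
  | nil => simp [PySem.List.enumerate_nil]
  | cons l rest ih =>
      rw [PySem.List.enumerate_cons, List.flatMap_cons, List.map_append]
      refine List.Nodup.append ?_ (ih (s0 + 1)) ?_
      · have hp := PySem.List.pairwise_lt_enumerate (xs := l.toList) (s := 0)
        have hlt : ((pvLineCells (s0, l)).map (·.1)).Pairwise (fun a b => a.2 < b.2) := by
          simp only [pvLineCells, List.map_map]
          exact (List.pairwise_map).2 (hp.imp (fun h => by simpa using h))
        exact hlt.imp (fun h he => by rw [he] at h; exact lt_irrefl _ h)
      · intro k hk hk'
        simp only [pvLineCells, List.map_map, List.mem_map] at hk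
        obtain ⟨cc, _, rfl⟩ := hk
        simp only [List.mem_map, List.mem_flatMap] at hk'
        obtain ⟨pc, ⟨rl, hrl, hpc⟩, hfst⟩ := hk'
        rw [PySem.List.mem_enumerate_iff] at hrl
        obtain ⟨j, hj, rfl⟩ := hrl
        simp only [pvLineCells, List.mem_map] at hpc
        obtain ⟨cc', _, rfl⟩ := hpc
        have : s0 + 1 + (j : Int) = s0 := by
          have := congrArg Prod.fst hfst; simpa using this
        omega

-- splitting B's fold into its two independent component folds
theorem pvSplitB (l : List ((Int × Int) × Char)) (a : PySem.Set (Int × Int))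
    (d : PySem.Dict Char (List (Int × Int))) :
    l.foldl pvStepB (a, d)
      = (l.foldl (fun a pc => PySem.Set.add a pc.1) a,
         l.foldl (fun d pc => d.modify pc.2 [] (· ++ [pc.1])) d) := by
  induction l generalizing a d with
  | nil => rfl
  | cons pc rest ih => simp [pvStepB, ih]

-- B's index lookup: positions grouped under character ch are the ch-cells in row-major order
theorem pvIndexGetD (l : List ((Int × Int) × Char)) (ch : Char) :
    (l.foldl (fun d pc => d.modify pc.2 [] (· ++ [pc.1]))
        (PySem.Dict.empty : PySem.Dict Char (List (Int × Int)))).getD ch []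
      = (l.filter (fun p => p.2 == ch)).map (·.1) := by
  have h := PySem.Dict.getD_foldl_modify_append
    (l := l.map (fun pc => (pc.2, pc.1)))
    (d := (PySem.Dict.empty : PySem.Dict Char (List (Int × Int)))) (c := ch)
  rw [List.foldl_map] at h
  simp only [PySem.Dict.getD_empty, List.nil_append, List.filter_map, List.map_map] at h
  simpa [Function.comp] using h

-- first matching element: head of the filtered list = find?
theorem pvHeadFilter (l : List ((Int × Int) × Char)) (p : (Int × Int) × Char → Bool) :
    (l.filter p).head? = l.find? p := by
  induction l with
  | nil => rfl
  | cons x rest ih => by_cases h : p x <;> simp [h, ih]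

-- xs[0] = head?
theorem pvGetZero (l : List (Int × Int)) : PySem.List.pyGet? l 0 = l.head? := by
  cases l <;> simp [PySem.List.pyGet?, PySem.List.pyIdx?]

-- add fold from empty = Set.ofList
theorem pvAddFold (l : List ((Int × Int) × Char)) :
    l.foldl (fun a pc => PySem.Set.add a pc.1) PySem.Set.empty
      = PySem.Set.ofList (l.map (·.1)) := by
  rw [PySem.Set.ofList_eq_foldl, List.foldl_map]; rfl

-- A's board items are exactly the row-major cells
theorem pvBoardItems (s : String) :
    (((PySem.List.enumerate (PySem.Str.splitlines s)).foldl
      (fun d rl => (PySem.List.enumerate rl.2.toList).foldl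
        (fun d cc => d.insert (rl.1, cc.1) cc.2) d)
      PySem.Dict.empty) : PySem.Dict (Int × Int) Char).items = pvCells s := by
  rw [pvFlattenA]
  have h := PySem.Dict.items_foldl_insert_fresh
    (l := pvCells s) (k := fun pc => pc.1) (v := fun pc => pc.2)
    (d := (PySem.Dict.empty : PySem.Dict (Int × Int) Char))
    (by intro a _; simp [PySem.Dict.contains_empty])
    (pvNodupKeys (PySem.Str.splitlines s) 0)
  simpa [pvCells] using h

-- ===== VERDICT (by name: the statement is the Claim_ definition above) =====
theorem parse_board_spec : Claim_equal_parse_board := by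
  intro s _ _
  unfold Spec_parse_board
  simp only [parse_board, parse_board_alt]
  rw [pvFlattenB, pvSplitB, pvBoardItems]
  have hc : List.flatMap pvLineCells (PySem.List.enumerate (PySem.Str.splitlines s)) = pvCells s := rfl
  rw [hc, pvAddFold, pvIndexGetD, pvIndexGetD, pvIndexGetD, pvGetZero]
  have hkeys : (((PySem.List.enumerate (PySem.Str.splitlines s)).foldl
      (fun d rl => (PySem.List.enumerate rl.2.toList).foldl
        (fun d cc => d.insert (rl.1, cc.1) cc.2) d)
      PySem.Dict.empty) : PySem.Dict (Int × Int) Char).keys = (pvCells s).map (·.1) := by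
    simp only [PySem.Dict.keys, pvBoardItems]
  rw [hkeys]
  rw [← pvHeadFilter, ← List.head?_map]
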